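-- pv_equiv track=rewrite | github.com/rosinaSav/NAS_code | disease_snps_ops.py | get_exon_nts
-- ===== SOURCE A (Python) =====
-- def get_exon_nts(exon_list, coding_exons):
--     '''
--     Get the count of nts in each window
--     '''
--     nts = [0,0,0]
--     for id in exon_list:
--         transcript = exon_list[id][0]
--         exon_id = exon_list[id][1]
--         exon_seq = coding_exons[transcript][exon_id]
--         exon_length = len(exon_seq)
--
--         if exon_length <= 4:
--             nts[0] += 4
--         elif exon_length > 4 and exon_length <= 138:
--             nts[0] += 4
--             nts[1] += 134
--         else:
--             nts[0] += 4
--             nts[1] += 134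
--             nts[2] += (exon_length - 138)
--
--     return nts
-- ===== SOURCE B (Python) =====
-- def get_exon_nts(exon_list, coding_exons):
--     '''
--     Get the count of nts in each window
--     '''
--     # Histogram of exon lengths: every exon of the same length contributes the
--     # same amounts, so aggregate once per distinct length, weighted by multiplicity.
--     freq = {}
--     for id in exon_list:
--         length = len(coding_exons[exon_list[id][0]][exon_list[id][1]])
--         freq[length] = freq.get(length, 0) + 1
--     nts = [0, 0, 0]
--     for length, c in freq.items():
--         nts[0] += 4 * c
--         if length > 4:
--             nts[1] += 134 * c
--         if length > 138:
--             nts[2] += (length - 138) * c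
--     return nts
-- ===== Notes on version B (the rewrite author's own statement) =====
-- stated objective: alternative
-- what changed: Builds a frequency histogram of exon lengths first, then computes the three window totals per DISTINCT length weighted by its multiplicity, instead of A's per-exon branching accumulation into a shared nts list.
import Mathlib
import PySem

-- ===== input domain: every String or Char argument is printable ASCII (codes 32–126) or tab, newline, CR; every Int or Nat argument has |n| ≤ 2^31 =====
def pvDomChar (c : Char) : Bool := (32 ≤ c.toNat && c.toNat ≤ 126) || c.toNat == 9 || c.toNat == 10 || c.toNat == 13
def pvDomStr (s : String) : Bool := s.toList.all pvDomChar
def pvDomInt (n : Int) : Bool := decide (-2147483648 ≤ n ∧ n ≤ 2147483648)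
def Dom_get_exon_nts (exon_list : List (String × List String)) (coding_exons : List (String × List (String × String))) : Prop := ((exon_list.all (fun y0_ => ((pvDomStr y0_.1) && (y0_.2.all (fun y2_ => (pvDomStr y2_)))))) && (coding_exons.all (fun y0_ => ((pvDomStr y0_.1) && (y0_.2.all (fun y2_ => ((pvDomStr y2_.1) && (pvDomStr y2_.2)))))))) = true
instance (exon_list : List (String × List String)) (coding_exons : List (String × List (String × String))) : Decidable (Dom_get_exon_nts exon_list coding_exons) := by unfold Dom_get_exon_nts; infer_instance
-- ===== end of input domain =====

-- B replaces A's per-exon branching accumulation with a histogram of exon lengths built first,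
-- then one weighted aggregation per DISTINCT length (alternative decomposition; return value equal).


-- ===== PORT A =====
def get_exon_nts (exon_list : List (String × List String)) (coding_exons : List (String × List (String × String))) : List Int :=
  let el := PySem.Dict.ofList exon_list
  let ce := PySem.Dict.ofList coding_exons
  -- nts = [0,0,0] carried as a triple; the .getD totalizations are exact under Pre_ (IndexError/KeyError excluded)
  let nts := el.keys.foldl (fun (nts : Int × Int × Int) id =>
    let v := el.getD id []
    let transcript := (PySem.List.pyGet? v 0).getD ""
    let exon_id := (PySem.List.pyGet? v 1).getD ""
    let exon_seq := (PySem.Dict.ofList (ce.getD transcript [])).getD exon_id ""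
    let exon_length := PySem.Str.len exon_seq
    if exon_length ≤ 4 then (nts.1 + 4, nts.2.1, nts.2.2)
    else if exon_length > 4 ∧ exon_length ≤ 138 then (nts.1 + 4, nts.2.1 + 134, nts.2.2)
    else (nts.1 + 4, nts.2.1 + 134, nts.2.2 + (exon_length - 138))) (0, 0, 0)
  [nts.1, nts.2.1, nts.2.2]

-- ===== PORT B =====
def get_exon_nts_alt (exon_list : List (String × List String)) (coding_exons : List (String × List (String × String))) : List Int :=
  let el := PySem.Dict.ofList exon_list
  let ce := PySem.Dict.ofList coding_exons
  -- freq[length] = freq.get(length, 0) + 1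
  let freq := el.keys.foldl (fun (d : PySem.Dict Int Int) id =>
    let length := PySem.Str.len ((PySem.Dict.ofList
        (ce.getD ((PySem.List.pyGet? (el.getD id []) 0).getD "") [])).getD
        ((PySem.List.pyGet? (el.getD id []) 1).getD "") "")
    d.insert length (d.getD length 0 + 1)) PySem.Dict.empty
  -- for length, c in freq.items(): …
  let nts := freq.items.foldl (fun (nts : Int × Int × Int) p =>
    let n0 := nts.1 + 4 * p.2
    let n1 := if p.1 > 4 then nts.2.1 + 134 * p.2 else nts.2.1
    let n2 := if p.1 > 138 then nts.2.2 + (p.1 - 138) * p.2 else nts.2.2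
    (n0, n1, n2)) (0, 0, 0)
  [nts.1, nts.2.1, nts.2.2]

-- ===== PRECONDITION & SPEC =====
-- Pre_ excludes exactly the inputs where Python A raises: an exon_list entry with fewer than two
-- fields (IndexError) or whose transcript / exon id is absent from coding_exons (KeyError).
def Pre_get_exon_nts (exon_list : List (String × List String)) (coding_exons : List (String × List (String × String))) : Prop :=
  ∀ p ∈ (PySem.Dict.ofList exon_list).items,
    2 ≤ p.2.length ∧
    ∃ inner, (PySem.Dict.ofList coding_exons).get? ((PySem.List.pyGet? p.2 0).getD "") = some inner ∧
      (PySem.Dict.ofList inner).contains ((PySem.List.pyGet? p.2 1).getD "") = true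
instance (exon_list : List (String × List String)) (coding_exons : List (String × List (String × String))) : Decidable (Pre_get_exon_nts exon_list coding_exons) := by unfold Pre_get_exon_nts; infer_instance

def pvWitness_get_exon_nts : (List (String × List String)) × (List (String × List (String × String))) :=
  ([("id0", ["t0", "e0"]), ("id1", ["t0", "e1"])],
   [("t0", [("e0", "ACGT"), ("e1", "ACGTACGT")])])

def Spec_get_exon_nts (exon_list : List (String × List String)) (coding_exons : List (String × List (String × String))) (out : List Int) : Prop := out = get_exon_nts_alt exon_list coding_exons
instance (exon_list : List (String × List String)) (coding_exons : List (String × List (String × String))) (out : List Int) : Decidable (Spec_get_exon_nts exon_list coding_exons out) := by unfold Spec_get_exon_nts; infer_instance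

-- ===== CLAIM (what is proved, stated in full; the proofs are below) =====
def Claim_equal_get_exon_nts : Prop := ∀ (exon_list : List (String × List String)) (coding_exons : List (String × List (String × String))), Dom_get_exon_nts exon_list coding_exons → Pre_get_exon_nts exon_list coding_exons → Spec_get_exon_nts exon_list coding_exons (get_exon_nts exon_list coding_exons)

-- ===== LEMMAS AND PROOFS =====

-- A's branching fold over any key list equals the three aggregates of the mapped lengths.
theorem get_exon_nts_loopA (f : String → Int) (ks : List String) (a b c : Int) :
    ks.foldl (fun (nts : Int × Int × Int) id =>
      let L := f id
      if L ≤ 4 then (nts.1 + 4, nts.2.1, nts.2.2)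
      else if L > 4 ∧ L ≤ 138 then (nts.1 + 4, nts.2.1 + 134, nts.2.2)
      else (nts.1 + 4, nts.2.1 + 134, nts.2.2 + (L - 138))) (a, b, c)
    = (a + 4 * (ks.map f).length,
       b + 134 * (((ks.map f).countP (fun L => decide (4 < L)) : Nat) : Int),
       c + (((ks.map f).filter (fun L => decide (138 < L))).map (fun L => L - 138)).sum) := by
  induction ks generalizing a b c with
  | nil => simp
  | cons k ks ih =>
    simp only [List.foldl_cons, List.map_cons, List.countP_cons, List.filter_cons]
    by_cases h4 : f k ≤ 4
    · rw [if_pos h4, ih]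
      simp only [show ¬ (4 < f k) by omega, show ¬ (138 < f k) by omega, decide_false,
        Bool.false_eq_true, if_false, List.length_cons, Prod.mk.injEq]
      refine ⟨by push_cast; ring, by simp, by simp⟩
    · rw [if_neg h4]
      by_cases h138 : f k ≤ 138
      · rw [if_pos ⟨by omega, h138⟩, ih]
        simp only [show (4 < f k) by omega, show ¬ (138 < f k) by omega, decide_true,
          decide_false, if_true, Bool.false_eq_true, List.length_cons, Prod.mk.injEq]
        refine ⟨by push_cast; ring, by push_cast; ring, by simp⟩
      · rw [if_neg (fun h => h138 h.2), ih]
        simp only [show (4 < f k) by omega, show (138 < f k) by omega, decide_true, if_true,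
          List.map_cons, List.sum_cons, List.length_cons, Prod.mk.injEq]
        refine ⟨?_, ?_, ?_⟩ <;> (push_cast; ring)

-- B's items loop is the three sums over the (length, count) pairs.
theorem get_exon_nts_loopB (items : List (Int × Int)) (a b c : Int) :
    items.foldl (fun (nts : Int × Int × Int) p =>
      let n0 := nts.1 + 4 * p.2
      let n1 := if p.1 > 4 then nts.2.1 + 134 * p.2 else nts.2.1
      let n2 := if p.1 > 138 then nts.2.2 + (p.1 - 138) * p.2 else nts.2.2
      (n0, n1, n2)) (a, b, c)
    = (a + (items.map (fun p => 4 * p.2)).sum,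
       b + (items.map (fun p => (if 4 < p.1 then 134 else 0) * p.2)).sum,
       c + (items.map (fun p => (if 138 < p.1 then p.1 - 138 else 0) * p.2)).sum) := by
  induction items generalizing a b c with
  | nil => simp
  | cons p items ih =>
    simp only [List.foldl_cons, List.map_cons, List.sum_cons, ih]
    by_cases h4 : 4 < p.1 <;> by_cases h138 : 138 < p.1 <;>
      simp only [h4, h138, gt_iff_lt, if_pos, if_neg, ite_true, ite_false, Prod.mk.injEq] <;>
      first
        | (refine ⟨by ring, by ring, by ring⟩)
        | (omega)

-- a Nodup list sums an 'if k = x' spike to the single value at x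
theorem sum_map_ite_eq_of_nodup (x v : Int) :
    ∀ S : List Int, S.Nodup → x ∈ S →
      (S.map (fun k => if k = x then v else 0)).sum = v := by
  intro S
  induction S with
  | nil => intro _ hx; cases hx
  | cons s S ih =>
    intro hnd hx
    simp only [List.map_cons, List.sum_cons]
    rcases List.mem_cons.mp hx with h | h
    · have hz : ∀ k ∈ S, (if k = x then v else (0:Int)) = 0 := by
        intro k hk
        have hks : k ≠ x := fun he => (List.nodup_cons.mp hnd).1 (h ▸ he ▸ hk)
        simp [hks]
      have hz0 : (S.map (fun k => if k = x then v else 0)).sum = 0 := by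
        apply List.sum_eq_zero
        intro y hy
        rcases List.mem_map.mp hy with ⟨k, hk, rfl⟩
        exact hz k hk
      rw [if_pos h.symm, hz0]
      ring
    · have hne : s ≠ x := fun he => (List.nodup_cons.mp hnd).1 (he ▸ h)
      rw [if_neg hne, ih (List.nodup_cons.mp hnd).2 h]
      ring

-- summing g weighted by multiplicities over a Nodup cover equals summing g over the list itself
theorem sum_map_mul_count (g : Int → Int) (L S : List Int)
    (hnd : S.Nodup) (hsub : ∀ x ∈ L, x ∈ S) :
    (S.map (fun k => g k * (L.count k : Int))).sum = (L.map g).sum := by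
  induction L with
  | nil => simp
  | cons x L ih =>
    have hsub' : ∀ y ∈ L, y ∈ S := fun y hy => hsub y (List.mem_cons_of_mem _ hy)
    have hmap : S.map (fun k => g k * ((x :: L).count k : Int))
        = S.map (fun k => g k * (L.count k : Int) + (if k = x then g x else 0)) := by
      apply List.map_congr_left
      intro k _
      by_cases h : k = x
      · subst h; simp [List.count_cons]; ring
      · have h' : ¬ x = k := fun he => h he.symm
        simp [List.count_cons, h, h']
    rw [hmap, PySem.List.sum_map_add_int, ih hsub',
      sum_map_ite_eq_of_nodup x (g x) S hnd (hsub x List.mem_cons_self)]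
    simp [List.map_cons]
    ring

-- the three weight instances
theorem sum_g_const (L : List Int) : (L.map (fun _ => (4:Int))).sum = 4 * (L.length : Int) := by
  induction L with
  | nil => simp
  | cons x L ih => simp only [List.map_cons, List.sum_cons, ih, List.length_cons]; push_cast; ring

theorem sum_g_134 (L : List Int) :
    (L.map (fun x => if 4 < x then (134:Int) else 0)).sum
      = 134 * ((L.countP (fun x => decide (4 < x)) : Nat) : Int) := by
  induction L with
  | nil => simp
  | cons x L ih =>
    simp only [List.map_cons, List.sum_cons, ih, List.countP_cons]
    by_cases h : 4 < x <;> simp [h] <;> push_cast <;> ring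

theorem sum_g_over (L : List Int) :
    (L.map (fun x => if 138 < x then x - 138 else 0)).sum
      = ((L.filter (fun x => decide (138 < x))).map (fun x => x - 138)).sum := by
  induction L with
  | nil => simp
  | cons x L ih =>
    simp only [List.map_cons, List.sum_cons, List.filter_cons, ih]
    by_cases h : 138 < x <;> simp [h]

-- ===== VERDICT (by name: the statement is the Claim_ definition above) =====
theorem get_exon_nts_spec : Claim_equal_get_exon_nts := by
  intro exon_list coding_exons _ _
  unfold Spec_get_exon_nts get_exon_nts get_exon_nts_alt
  dsimp only
  set el := PySem.Dict.ofList exon_list with hel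
  set ce := PySem.Dict.ofList coding_exons with hce
  set f : String → Int := fun id => PySem.Str.len ((PySem.Dict.ofList
      (ce.getD ((PySem.List.pyGet? (el.getD id []) 0).getD "") [])).getD
      ((PySem.List.pyGet? (el.getD id []) 1).getD "") "") with hf
  -- A side
  rw [get_exon_nts_loopA f]
  -- B side: the freq-building loop is counter (el.keys.map f)
  have hfreq : el.keys.foldl (fun (d : PySem.Dict Int Int) id =>
      d.insert (f id) (d.getD (f id) 0 + 1)) PySem.Dict.empty
      = PySem.Dict.counter (el.keys.map f) := by
    rw [← PySem.Dict.foldl_insert_getD_add_one_eq_counter, List.foldl_map]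
  rw [hfreq, PySem.Dict.items_counter, get_exon_nts_loopB]
  set L := el.keys.map f with hL
  set S := PySem.Set.ofList L with hS
  have hnd : S.Nodup := PySem.Set.nodup_ofList L
  have hsub : ∀ x ∈ L, x ∈ S := fun x hx => (PySem.Set.mem_ofList L x).mpr hx
  simp only [zero_add, List.map_map, Function.comp_def,
    sum_map_mul_count (fun _ => (4:Int)) L S hnd hsub,
    sum_map_mul_count (fun x => if 4 < x then (134:Int) else 0) L S hnd hsub,
    sum_map_mul_count (fun x => if 138 < x then x - 138 else 0) L S hnd hsub,
    sum_g_const, sum_g_134, sum_g_over]
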